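-- pv_equiv track=rewrite | github.com/krzyssikora/advent_of_code | aoc_2018/02_inventory.py | twos_threes
-- ===== SOURCE A (Python) =====
-- def twos_threes(idx):
--     freq_dict = dict()
--     for ch in idx:
--         freq_dict[ch] = freq_dict.get(ch, 0) + 1
--     frequencies = list(freq_dict.values())
--     two = 1 if 2 in frequencies else 0
--     three = 1 if 3 in frequencies else 0
--     return two, three
-- ===== SOURCE B (Python) =====
-- def twos_threes(idx):
--     s = sorted(idx)
--     two = 0
--     three = 0
--     i = 0
--     n = len(s)
--     while i < n:
--         j = i + 1
--         while j < n and s[j] == s[i]: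
--             j += 1
--         if j - i == 2:
--             two = 1
--         if j - i == 3:
--             three = 1
--         i = j
--     return two, three
-- ===== Notes on version B (the rewrite author's own statement) =====
-- stated objective: alternative
-- what changed: Replaces the frequency-dict build and membership test over its values by sorting the characters and scanning consecutive equal runs, flagging run lengths 2 and 3.
import Mathlib
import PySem

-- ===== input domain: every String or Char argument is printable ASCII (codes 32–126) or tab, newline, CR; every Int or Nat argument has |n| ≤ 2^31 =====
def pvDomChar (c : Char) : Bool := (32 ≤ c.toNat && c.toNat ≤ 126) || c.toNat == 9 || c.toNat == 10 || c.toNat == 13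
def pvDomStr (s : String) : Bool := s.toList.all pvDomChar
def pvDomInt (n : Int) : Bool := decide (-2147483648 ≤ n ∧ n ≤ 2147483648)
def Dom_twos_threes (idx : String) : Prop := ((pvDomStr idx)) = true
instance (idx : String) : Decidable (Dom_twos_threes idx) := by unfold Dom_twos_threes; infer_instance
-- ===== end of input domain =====

-- B replaces A's frequency dict by sorting the characters and scanning consecutive equal runs (alternative algorithm, not claimed faster).

-- ===== PORT A =====
def twos_threes (idx : String) : Int × Int :=
  let freq_dict : PySem.Dict Char Int :=
    idx.toList.foldl (fun d ch => d.insert ch (d.getD ch 0 + 1)) PySem.Dict.empty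
  let frequencies : List Int := freq_dict.values
  let two : Int := if (2 : Int) ∈ frequencies then 1 else 0
  let three : Int := if (3 : Int) ∈ frequencies then 1 else 0
  (two, three)

-- ===== PORT B =====
-- the outer while loop of Source B: state (two, three), remaining suffix of the sorted list from index i;
-- the inner while loop advancing j over characters equal to s[i] is the takeWhile/dropWhile split.
def twosThreesScan (s : List Char) (two three : Int) : Int × Int :=
  match s with
  | [] => (two, three)
  | c :: rest =>
    let run : Nat := 1 + (rest.takeWhile (fun x => x == c)).length   -- j - i
    let two := if run = 2 then 1 else two
    let three := if run = 3 then 1 else three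
    twosThreesScan (rest.dropWhile (fun x => x == c)) two three
termination_by s.length
decreasing_by
  simpa using Nat.lt_succ_of_le (List.length_dropWhile_le _ _)

def twos_threes_alt (idx : String) : Int × Int :=
  twosThreesScan (PySem.List.sorted idx.toList (fun x => x) false) 0 0

-- ===== PRECONDITION & SPEC =====
def Spec_twos_threes (idx : String) (out : Int × Int) : Prop := out = twos_threes_alt idx
instance (idx : String) (out : Int × Int) : Decidable (Spec_twos_threes idx out) := by unfold Spec_twos_threes; infer_instance

-- ===== CLAIM (what is proved, stated in full; the proofs are below) =====
def Claim_equal_twos_threes : Prop := ∀ (idx : String), Dom_twos_threes idx → Spec_twos_threes idx (twos_threes idx)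

-- ===== LEMMAS AND PROOFS =====

-- membership of k among A's dict values ↔ some character of the list occurs k times
theorem pv_mem_values_iff (l : List Char) (k : Int) :
    k ∈ (l.foldl (fun d ch => d.insert ch (d.getD ch 0 + 1)) PySem.Dict.empty).values ↔
      ∃ ch ∈ l, (l.count ch : Int) = k := by
  rw [PySem.Dict.foldl_insert_getD_add_one_eq_counter]
  simp only [PySem.Dict.values, PySem.Dict.items_counter, List.map_map, List.mem_map,
    Function.comp]
  constructor
  · rintro ⟨ch, hch, rfl⟩
    exact ⟨ch, (PySem.Set.mem_ofList l ch).1 hch, rfl⟩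
  · rintro ⟨ch, hch, rfl⟩
    exact ⟨ch, (PySem.Set.mem_ofList l ch).2 hch, rfl⟩

-- on a list whose elements are all ≥ c, sorted, c never survives the dropWhile split
theorem pv_not_mem_drop (l : List Char) (c : Char) (hall : ∀ x ∈ l, c ≤ x)
    (hpw : l.Pairwise (· ≤ ·)) : c ∉ l.dropWhile (fun x => x == c) := by
  induction l with
  | nil => simp
  | cons x l' ih =>
    rcases List.pairwise_cons.1 hpw with ⟨hx, hpw'⟩
    by_cases hxc : x = c
    · subst hxc
      simpa [List.dropWhile] using ih hx hpw'
    · have hcx : c < x := lt_of_le_of_ne (hall x List.mem_cons_self) (fun h => hxc h.symm)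
      have hb : (x == c) = false := by simp [hxc]
      rw [List.dropWhile_cons_of_neg (by simp [hb])]
      intro hmem
      rcases List.mem_cons.1 hmem with h | h
      · exact hxc h.symm
      · exact absurd (hx c h) (not_le_of_gt hcx)

-- decomposing 'some character of c :: (t ++ d) occurs k times' along the leading run c :: t
theorem pv_any_split (c : Char) (t d : List Char) (k : Nat)
    (ht_mem : ∀ x ∈ t, x = c) (hnotin : c ∉ d) :
    ((c :: (t ++ d)).any (fun x => (c :: (t ++ d)).count x == k) = true ↔
      (1 + t.length = k ∨ (d.any (fun x => d.count x == k)) = true)) := by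
  have hct : t.count c = t.length := List.count_eq_length.2 (fun b hb => (ht_mem b hb).symm)
  have hrun : (c :: (t ++ d)).count c = 1 + t.length := by
    rw [List.count_cons_self, List.count_append, hct, List.count_eq_zero.2 hnotin]
    omega
  have hd_count : ∀ x ∈ d, (c :: (t ++ d)).count x = d.count x := by
    intro x hxd
    have hxc : x ≠ c := fun h => hnotin (h ▸ hxd)
    have hxt : x ∉ t := fun hmem => hxc (ht_mem x hmem)
    simp [List.count_append, List.count_eq_zero.2 hxt, Ne.symm hxc]
  constructor
  · intro h
    rcases List.any_eq_true.1 h with ⟨x, hx, hk⟩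
    have hk' : (c :: (t ++ d)).count x = k := by simpa using hk
    rcases List.mem_cons.1 hx with rfl | hx'
    · left; rw [← hrun]; exact hk'
    · rcases List.mem_append.1 hx' with hxt | hxd
      · left
        have := ht_mem x hxt
        subst this
        rw [← hrun]; exact hk'
      · right
        exact List.any_eq_true.2 ⟨x, hxd, by simp [← hd_count x hxd, hk']⟩
  · intro h
    rcases h with h | h
    · exact List.any_eq_true.2 ⟨c, List.mem_cons_self, by simp [hrun, h]⟩
    · rcases List.any_eq_true.1 h with ⟨x, hxd, hk⟩
      refine List.any_eq_true.2 ⟨x, List.mem_cons_of_mem c (List.mem_append_right t hxd), ?_⟩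
      simp only [hd_count x hxd]
      exact hk

-- folding the scan's flag update into the disjunction of the run test and the recursive flag
theorem pv_if_flag (p : Prop) [Decidable p] (b : Bool) (x : Int) :
    (if b then (1 : Int) else (if p then 1 else x)) = (if (decide p || b) then 1 else x) := by
  by_cases hp : p <;> cases b <;> simp [hp]

-- the scan on a sorted list computes flags for 'some character occurs exactly 2 / 3 times'
set_option maxRecDepth 8000 in
theorem pv_scan_eq (n : Nat) : ∀ (l : List Char), l.length ≤ n → l.Pairwise (· ≤ ·) →
    ∀ two three : Int,
      twosThreesScan l two three =
        ((if l.any (fun x => l.count x == 2) then 1 else two),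
         (if l.any (fun x => l.count x == 3) then 1 else three)) := by
  induction n with
  | zero =>
    intro l hl _ two three
    have : l = [] := List.length_eq_zero_iff.1 (Nat.le_zero.1 hl)
    subst this
    simp [twosThreesScan]
  | succ n ih =>
    intro l hl hpw two three
    match l with
    | [] => simp [twosThreesScan]
    | c :: rest =>
      simp only [twosThreesScan]
      obtain ⟨t, d, hrest, ht, hd⟩ : ∃ t d, rest = t ++ d ∧
          t = rest.takeWhile (fun x => x == c) ∧ d = rest.dropWhile (fun x => x == c) :=
        ⟨_, _, (List.takeWhile_append_dropWhile).symm, rfl, rfl⟩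
      subst hrest
      rcases List.pairwise_cons.1 hpw with ⟨hall, hpw'⟩
      have ht_mem : ∀ x ∈ t, x = c := by
        intro x hxt
        have := List.mem_takeWhile_imp (ht ▸ hxt)
        simpa using this
      have hnotin : c ∉ d := hd ▸ pv_not_mem_drop (t ++ d) c hall hpw'
      have hdpw : d.Pairwise (· ≤ ·) := hpw'.sublist (List.sublist_append_right t d)
      have hdlen : d.length ≤ n := by
        have : (c :: (t ++ d)).length ≤ n + 1 := hl
        simp [List.length_append] at this
        omega
      rw [← ht, ← hd, ih d hdlen hdpw]
      have e2 : ((c :: (t ++ d)).any (fun x => (c :: (t ++ d)).count x == 2)) =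
          (decide (1 + t.length = 2) || d.any (fun x => d.count x == 2)) := by
        rw [Bool.eq_iff_iff]
        simp only [Bool.or_eq_true, decide_eq_true_eq]
        exact pv_any_split c t d 2 ht_mem hnotin
      have e3 : ((c :: (t ++ d)).any (fun x => (c :: (t ++ d)).count x == 3)) =
          (decide (1 + t.length = 3) || d.any (fun x => d.count x == 3)) := by
        rw [Bool.eq_iff_iff]
        simp only [Bool.or_eq_true, decide_eq_true_eq]
        exact pv_any_split c t d 3 ht_mem hnotin
      rw [e2, e3, pv_if_flag, pv_if_flag]

-- ===== VERDICT (by name: the statement is the Claim_ definition above) =====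
theorem twos_threes_spec : Claim_equal_twos_threes := by
  intro idx _
  unfold Spec_twos_threes twos_threes twos_threes_alt
  set l0 := idx.toList with hl0
  set s := PySem.List.sorted l0 (fun x => x) false with hs
  have hperm : s.Perm l0 := PySem.List.sorted_perm l0 (fun x => x) false
  have hpw : s.Pairwise (· ≤ ·) := by
    simpa using PySem.List.sorted_pairwise l0 (fun x => x)
  rw [pv_scan_eq s.length s le_rfl hpw]
  have key : ∀ k : Nat, ((k : Int) ∈ (l0.foldl (fun d ch => d.insert ch (d.getD ch 0 + 1))
      PySem.Dict.empty).values ↔ (s.any (fun x => s.count x == k)) = true) := by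
    intro k
    rw [pv_mem_values_iff, List.any_eq_true]
    constructor
    · rintro ⟨ch, hch, hcnt⟩
      refine ⟨ch, hperm.mem_iff.2 hch, ?_⟩
      have : l0.count ch = k := by exact_mod_cast hcnt
      simp [hperm.count_eq, this]
    · rintro ⟨ch, hch, hcnt⟩
      refine ⟨ch, hperm.mem_iff.1 hch, ?_⟩
      have : s.count ch = k := by simpa using hcnt
      rw [← hperm.count_eq, this]
  have k2 : ((2 : Int) ∈ (l0.foldl (fun d ch => d.insert ch (d.getD ch 0 + 1))
      PySem.Dict.empty).values ↔ (s.any (fun x => s.count x == 2)) = true) := by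
    simpa using key 2
  have k3 : ((3 : Int) ∈ (l0.foldl (fun d ch => d.insert ch (d.getD ch 0 + 1))
      PySem.Dict.empty).values ↔ (s.any (fun x => s.count x == 3)) = true) := by
    simpa using key 3
  simp only
  simp only [k2, k3]
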